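-- pv_equiv track=rewrite | github.com/buaa-hipo/AOStencil | aostencil/kernel_gen.py | build_add_tree_variable
-- ===== SOURCE A (Python) =====
-- def build_add_tree_variable(toAdd:list,addFunc:str):
--     # Ensure the input list has more than one element
--     if len(toAdd) < 2:
--         return str(toAdd[0]) if toAdd else ""
--
--     while len(toAdd) > 1:
--         new_list = []
--         for i in range(0, len(toAdd)-1, 2):
--             new_list.append(f"{addFunc}({toAdd[i]}, {toAdd[i+1]})")
--         if len(toAdd) % 2 == 1:
--             new_list.append(toAdd[-1])
--         toAdd = new_list
--     return toAdd[0]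
-- ===== SOURCE B (Python) =====
-- def build_add_tree_variable(toAdd: list, addFunc: str):
--     # Top-down divide and conquer: split off the largest power-of-two block of
--     # leaves (the left subtree of A's level-by-level pairing) and recurse.
--     if len(toAdd) < 2:
--         return str(toAdd[0]) if toAdd else ""
--     m = 1 << ((len(toAdd) - 1).bit_length() - 1)
--     left = build_add_tree_variable(toAdd[:m], addFunc)
--     right = build_add_tree_variable(toAdd[m:], addFunc)
--     return f"{addFunc}({left}, {right})"
-- ===== Notes on version B (the rewrite author's own statement) =====
-- stated objective: alternative
-- what changed: Replaced A's bottom-up level-by-level pairing loop (rebuilding a shrinking list each round) with a top-down divide-and-conquer recursion that splits off the largest power-of-two block of leaves (computed via bit_length) and recurses on the two halves.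
import Mathlib
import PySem

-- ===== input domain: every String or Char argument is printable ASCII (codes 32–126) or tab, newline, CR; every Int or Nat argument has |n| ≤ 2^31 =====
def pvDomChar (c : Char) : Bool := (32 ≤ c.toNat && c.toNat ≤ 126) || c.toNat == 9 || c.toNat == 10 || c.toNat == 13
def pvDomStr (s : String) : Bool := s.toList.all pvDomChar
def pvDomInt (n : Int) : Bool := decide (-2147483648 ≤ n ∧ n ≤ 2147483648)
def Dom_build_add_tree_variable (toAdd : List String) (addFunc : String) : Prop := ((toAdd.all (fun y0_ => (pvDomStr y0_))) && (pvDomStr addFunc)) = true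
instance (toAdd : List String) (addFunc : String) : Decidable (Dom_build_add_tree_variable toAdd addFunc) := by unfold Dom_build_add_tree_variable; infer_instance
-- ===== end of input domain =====

-- B replaces A's level-by-level pairing loop with a top-down divide-and-conquer on the
-- largest power-of-two leaf block (alternative decomposition, same output byte-for-byte).


-- ===== PORT A =====
-- one pass of A's while-loop body: pair adjacent elements, carry the odd last one
def pvPairA (addFunc : String) (xs : List String) : List String :=
  let newList := (PySem.List.pyRange 0 ((xs.length : Int) - 1) 2).foldl
    (fun acc i => acc ++
      [addFunc ++ "(" ++ PySem.List.pyGetD xs i "" ++ ", " ++ PySem.List.pyGetD xs (i + 1) "" ++ ")"]) []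
  if xs.length % 2 == 1 then newList ++ [PySem.List.pyGetD xs (-1) ""] else newList

-- A's while-loop (fuel = initial length, a pure totality guard: the list shrinks every round)
def pvGoA (addFunc : String) : Nat → List String → List String
  | 0, xs => xs
  | fuel + 1, xs => if 1 < xs.length then pvGoA addFunc fuel (pvPairA addFunc xs) else xs

def build_add_tree_variable (toAdd : List String) (addFunc : String) : String :=
  if toAdd.length < 2 then
    -- str(toAdd[0]) if toAdd else "" ; str of a str is the string itself
    match toAdd with | [] => "" | x :: _ => x
  else
    PySem.List.pyGetD (pvGoA addFunc toAdd.length toAdd) 0 ""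

-- ===== PORT B =====
-- 1 << ((n-1).bit_length() - 1): the largest power of two below n (callers have 2 ≤ n)
def pvSplitB (n : Nat) : Nat := 1 <<< (PySem.Int.bitLength ((n : Int) - 1) - 1)

-- the recursion, with fuel = initial length (pure totality guard: both slices are shorter)
def pvAltF : Nat → List String → String → String
  | 0, _, _ => ""
  | fuel + 1, toAdd, addFunc =>
    if toAdd.length < 2 then
      match toAdd with | [] => "" | x :: _ => x
    else
      let m := pvSplitB toAdd.length
      addFunc ++ "(" ++
        pvAltF fuel (PySem.List.slice toAdd none (some (m : Int))) addFunc ++ ", " ++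
        pvAltF fuel (PySem.List.slice toAdd (some (m : Int)) none) addFunc ++ ")"

def build_add_tree_variable_alt (toAdd : List String) (addFunc : String) : String :=
  pvAltF toAdd.length toAdd addFunc

-- ===== PRECONDITION & SPEC =====
def Spec_build_add_tree_variable (toAdd : List String) (addFunc : String) (out : String) : Prop := out = build_add_tree_variable_alt toAdd addFunc
instance (toAdd : List String) (addFunc : String) (out : String) : Decidable (Spec_build_add_tree_variable toAdd addFunc out) := by unfold Spec_build_add_tree_variable; infer_instance

-- ===== CLAIM (what is proved, stated in full; the proofs are below) =====
def Claim_equal_build_add_tree_variable : Prop := ∀ (toAdd : List String) (addFunc : String), Dom_build_add_tree_variable toAdd addFunc → Spec_build_add_tree_variable toAdd addFunc (build_add_tree_variable toAdd addFunc)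

-- ===== LEMMAS AND PROOFS =====

theorem pvPairA_core (f : String) (xs : List String) :
    pvPairA f xs =
      (List.range (xs.length / 2)).map
        (fun k => f ++ "(" ++ xs.getD (2 * k) "" ++ ", " ++ xs.getD (2 * k + 1) "" ++ ")")
      ++ (if xs.length % 2 = 1 then [xs.getD (xs.length - 1) ""] else []) := by
  unfold pvPairA
  rw [PySem.List.foldl_append_singleton_eq_map, PySem.List.pyRange_of_pos 0 _ (by norm_num)]
  have hcount : (if (0:Int) < (xs.length : Int) - 1 then (((xs.length : Int) - 1 - 0 + 2 - 1) / 2).toNat else 0) = xs.length / 2 := by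
    split_ifs <;> omega
  rw [hcount, List.map_map]
  have hmap : ∀ k ∈ List.range (xs.length / 2),
      ((fun i => f ++ "(" ++ PySem.List.pyGetD xs i "" ++ ", " ++ PySem.List.pyGetD xs (i + 1) "" ++ ")") ∘ fun k : Nat => 0 + 2 * (k : Int)) k
        = f ++ "(" ++ xs.getD (2 * k) "" ++ ", " ++ xs.getD (2 * k + 1) "" ++ ")" := by
    intro k hk
    simp only [Function.comp, zero_add]
    have h1 : (2 * (k : Int)) = ((2 * k : Nat) : Int) := by push_cast; ring
    have h2 : ((2 * k : Nat) : Int) + 1 = ((2 * k + 1 : Nat) : Int) := by push_cast; ring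
    rw [h1, h2, PySem.List.pyGetD_natCast, PySem.List.pyGetD_natCast]
  rw [List.map_congr_left hmap]
  simp only [List.nil_append]
  by_cases hodd : xs.length % 2 = 1
  · have hne : xs ≠ [] := by intro h; subst h; simp at hodd
    rw [if_pos hodd, if_pos (by simpa using hodd), PySem.List.pyGetD_neg_one xs "" hne]
    congr 2
    rw [List.getLast_eq_getElem, List.getD_eq_getElem _ _ (by omega)]
  · rw [if_neg (by simpa using hodd), if_neg hodd, List.append_nil]

theorem pvPairA_length (f : String) (xs : List String) :
    (pvPairA f xs).length = (xs.length + 1) / 2 := by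
  rw [pvPairA_core]
  simp only [List.length_append, List.length_map, List.length_range]
  split_ifs <;> simp <;> omega

theorem pvSplitB_bounds (n : Nat) (h : 2 ≤ n) :
    1 ≤ pvSplitB n ∧ pvSplitB n < n ∧ n ≤ 2 * pvSplitB n := by
  unfold pvSplitB
  rw [Nat.one_shiftLeft]
  set b := PySem.Int.bitLength ((n : Int) - 1) with hb
  have hne : ((n : Int) - 1) ≠ 0 := by omega
  have habs : ((n : Int) - 1).natAbs = n - 1 := by omega
  have hlo := PySem.Int.two_pow_bitLength_le ((n : Int) - 1) hne
  have hhi := PySem.Int.lt_two_pow_bitLength ((n : Int) - 1)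
  rw [habs, ← hb] at hlo hhi
  have hb1 : 1 ≤ b := by
    by_contra hc
    interval_cases b
    · simp at hhi; omega
  have h2b : 2 ^ b = 2 * 2 ^ (b - 1) := by
    rw [← pow_succ']
    congr 1; omega
  rw [h2b] at hhi
  refine ⟨Nat.one_le_two_pow, by omega, by omega⟩

theorem pvPairA_nil (f : String) : pvPairA f [] = [] := by
  simp [pvPairA_core]

theorem pvPairA_one (f : String) (x : String) : pvPairA f [x] = [x] := by
  simp [pvPairA_core]

theorem pvPairA_cons2 (f a b : String) (t : List String) :
    pvPairA f (a :: b :: t) = (f ++ "(" ++ a ++ ", " ++ b ++ ")") :: pvPairA f t := by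
  rw [pvPairA_core, pvPairA_core]
  have hl : (a :: b :: t).length = t.length + 2 := by simp
  rw [hl, Nat.add_div_right _ (by norm_num), Nat.add_mod_right]
  rw [List.range_succ_eq_map, List.map_cons, List.map_map]
  have hhead : f ++ "(" ++ (a :: b :: t).getD (2 * 0) "" ++ ", " ++ (a :: b :: t).getD (2 * 0 + 1) "" ++ ")"
      = f ++ "(" ++ a ++ ", " ++ b ++ ")" := by simp
  rw [hhead, List.cons_append]
  congr 1
  have hmap : ∀ k ∈ List.range (t.length / 2),
      ((fun k => f ++ "(" ++ (a :: b :: t).getD (2 * k) "" ++ ", " ++ (a :: b :: t).getD (2 * k + 1) "" ++ ")") ∘ Nat.succ) k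
        = f ++ "(" ++ t.getD (2 * k) "" ++ ", " ++ t.getD (2 * k + 1) "" ++ ")" := by
    intro k hk
    simp only [Function.comp, Nat.succ_eq_add_one]
    have e1 : 2 * (k + 1) = (2 * k) + 1 + 1 := by ring
    rw [e1]
    simp
  rw [List.map_congr_left hmap]
  congr 1
  by_cases hodd : t.length % 2 = 1
  · rw [if_pos hodd, if_pos hodd]
    have : t.length + 2 - 1 = (t.length - 1) + 1 + 1 := by omega
    rw [this]
    simp
  · rw [if_neg hodd, if_neg hodd]

theorem pvPairA_append_even (f : String) :
    ∀ (k : Nat) (as bs : List String), as.length = 2 * k →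
      pvPairA f (as ++ bs) = pvPairA f as ++ pvPairA f bs := by
  intro k
  induction k with
  | zero =>
    intro as bs h
    have : as = [] := List.eq_nil_of_length_eq_zero (by omega)
    subst this; simp [pvPairA_nil]
  | succ k ih =>
    intro as bs h
    match as with
    | [] => simp at h
    | [a] => simp at h; omega
    | a :: b :: t =>
      have ht : t.length = 2 * k := by simp at h; omega
      rw [List.cons_append, List.cons_append, pvPairA_cons2, pvPairA_cons2, ih t bs ht,
        List.cons_append]

theorem pvSplitB_bl (n : Nat) (h : 3 ≤ n) :
    2 ≤ PySem.Int.bitLength ((n : Int) - 1) := by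
  by_contra hc
  have hb := PySem.Int.lt_two_pow_bitLength ((n : Int) - 1)
  have habs : ((n : Int) - 1).natAbs = n - 1 := by omega
  rw [habs] at hb
  interval_cases h : PySem.Int.bitLength ((n : Int) - 1) <;> simp_all <;> omega

theorem pvSplitB_even (n : Nat) (h : 3 ≤ n) : pvSplitB n % 2 = 0 := by
  have h2 := pvSplitB_bl n h
  unfold pvSplitB
  rw [Nat.one_shiftLeft]
  have : PySem.Int.bitLength ((n : Int) - 1) - 1 = (PySem.Int.bitLength ((n : Int) - 1) - 2) + 1 := by omega
  rw [this, pow_succ, Nat.mul_mod_left]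

theorem pvSplitB_half (n : Nat) (h : 3 ≤ n) : pvSplitB ((n + 1) / 2) = pvSplitB n / 2 := by
  have h2 := pvSplitB_bl n h
  unfold pvSplitB
  rw [Nat.one_shiftLeft, Nat.one_shiftLeft]
  have hc1 : (((n + 1) / 2 : Nat) : Int) - 1 = (((n - 1) / 2 : Nat) : Int) := by omega
  have hc2 : ((n : Nat) : Int) - 1 = (((n - 1 : Nat)) : Int) := by omega
  rw [hc1, hc2]
  have hbl := PySem.Int.bitLength_natCast (m := n - 1) (by omega)
  rw [hbl]
  have : PySem.Int.bitLength (((n - 1) / 2 : Nat) : Int) + 1 - 1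
       = (PySem.Int.bitLength (((n - 1) / 2 : Nat) : Int) - 1) + 1 := by
    rw [hc2, hbl] at h2; omega
  rw [this, pow_succ, Nat.mul_div_cancel _ (by norm_num)]

theorem alt_fuel_congr :
    ∀ (n f1 f2 : Nat) (xs : List String) (g : String), xs.length = n → n ≤ f1 → n ≤ f2 →
      pvAltF f1 xs g = pvAltF f2 xs g := by
  intro n
  induction n using Nat.strong_induction_on with
  | _ n ih =>
    intro f1 f2 xs g hlen h1 h2
    match f1, f2 with
    | 0, 0 => rfl
    | 0, f2 + 1 =>
      have : xs = [] := List.eq_nil_of_length_eq_zero (by omega)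
      subst this; rfl
    | f1 + 1, 0 =>
      have : xs = [] := List.eq_nil_of_length_eq_zero (by omega)
      subst this; rfl
    | f1 + 1, f2 + 1 =>
      simp only [pvAltF]
      by_cases hs : xs.length < 2
      · rw [if_pos hs, if_pos hs]
      · rw [if_neg hs, if_neg hs]
        have hb := pvSplitB_bounds xs.length (by omega)
        simp only [PySem.List.slice_to_natCast, PySem.List.slice_from_natCast]
        rw [ih (pvSplitB xs.length) (by omega) f1 f2 _ g (by rw [List.length_take]; omega)
              (by omega) (by omega),
          ih (xs.length - pvSplitB xs.length) (by omega) f1 f2 _ g (by rw [List.length_drop])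
              (by omega) (by omega)]

theorem alt_unfold (xs : List String) (f : String) (h : 2 ≤ xs.length) :
    build_add_tree_variable_alt xs f =
      f ++ "(" ++ build_add_tree_variable_alt (xs.take (pvSplitB xs.length)) f ++ ", " ++
        build_add_tree_variable_alt (xs.drop (pvSplitB xs.length)) f ++ ")" := by
  unfold build_add_tree_variable_alt
  obtain ⟨k, hk⟩ : ∃ k, xs.length = k + 1 := ⟨xs.length - 1, by omega⟩
  rw [hk]
  simp only [pvAltF]
  rw [if_neg (by omega)]
  have hb := pvSplitB_bounds xs.length (by omega)
  simp only [PySem.List.slice_to_natCast, PySem.List.slice_from_natCast]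
  rw [← hk]
  rw [alt_fuel_congr (xs.take (pvSplitB xs.length)).length k ((xs.take (pvSplitB xs.length)).length)
        _ f rfl (by rw [List.length_take]; omega) le_rfl,
    alt_fuel_congr (xs.drop (pvSplitB xs.length)).length k ((xs.drop (pvSplitB xs.length)).length)
        _ f rfl (by rw [List.length_drop]; omega) le_rfl]

theorem alt_one (x f : String) : build_add_tree_variable_alt [x] f = x := by
  rfl

theorem alt_pair (f : String) :
    ∀ (n : Nat) (xs : List String), xs.length = n → 2 ≤ n →
      build_add_tree_variable_alt (pvPairA f xs) f = build_add_tree_variable_alt xs f := by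
  intro n
  induction n using Nat.strong_induction_on with
  | _ n ih =>
    intro xs hlen h2
    by_cases h3 : n = 2
    · subst h3
      rcases List.length_eq_two.mp hlen with ⟨a, b, rfl⟩
      rw [pvPairA_cons2, pvPairA_nil, alt_one]
      rw [alt_unfold [a, b] f (by simp)]
      rw [show ([a, b] : List String).length = 2 from rfl,
        show pvSplitB 2 = 1 by decide]
      simp [alt_one]
    · have h3' : 3 ≤ n := by omega
      have hb := pvSplitB_bounds n (by omega)
      have hev := pvSplitB_even n h3'
      set m := pvSplitB n with hm
      have hm2 : 2 ≤ m := by omega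
      have hlt : (xs.take m).length = m := by rw [List.length_take]; omega
      have hld : (xs.drop m).length = n - m := by rw [List.length_drop, hlen]
      have hdist : pvPairA f xs = pvPairA f (xs.take m) ++ pvPairA f (xs.drop m) := by
        conv_lhs => rw [← List.take_append_drop m xs]
        exact pvPairA_append_even f (m / 2) _ _ (by omega)
      have hplen : (pvPairA f (xs.take m)).length = m / 2 := by
        rw [pvPairA_length, hlt]; omega
      have hPlen : (pvPairA f xs).length = (n + 1) / 2 := by rw [pvPairA_length, hlen]
      rw [alt_unfold (pvPairA f xs) f (by omega)]
      rw [hPlen, pvSplitB_half n h3', ← hm, hdist,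
        List.take_left' hplen, List.drop_left' hplen]
      rw [alt_unfold xs f (by omega), hlen, ← hm]
      have hL : build_add_tree_variable_alt (pvPairA f (xs.take m)) f = build_add_tree_variable_alt (xs.take m) f :=
        ih m (by omega) _ hlt hm2
      have hR : build_add_tree_variable_alt (pvPairA f (xs.drop m)) f = build_add_tree_variable_alt (xs.drop m) f := by
        by_cases hone : n - m = 1
        · obtain ⟨x, hx⟩ := List.length_eq_one_iff.mp (hld.trans hone)
          rw [hx, pvPairA_one]
        · exact ih (n - m) (by omega) _ hld (by omega)
      rw [hL, hR]

theorem goA_eq (f : String) :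
    ∀ (fuel : Nat) (xs : List String), xs.length ≤ fuel → 1 ≤ xs.length →
      pvGoA f fuel xs = [build_add_tree_variable_alt xs f] := by
  intro fuel
  induction fuel with
  | zero => intro xs h1 h2; omega
  | succ fuel ih =>
    intro xs h1 h2
    rw [pvGoA]
    by_cases hs : 1 < xs.length
    · rw [if_pos hs]
      rw [ih (pvPairA f xs) (by rw [pvPairA_length]; omega) (by rw [pvPairA_length]; omega)]
      rw [alt_pair f xs.length xs rfl (by omega)]
    · rw [if_neg hs]
      have hx : xs.length = 1 := by omega
      obtain ⟨x, rfl⟩ := List.length_eq_one_iff.mp hx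
      rw [alt_one]

-- ===== VERDICT (by name: the statement is the Claim_ definition above) =====
theorem build_add_tree_variable_spec : Claim_equal_build_add_tree_variable := by
  intro toAdd addFunc _
  unfold Spec_build_add_tree_variable build_add_tree_variable
  by_cases h2 : toAdd.length < 2
  · cases toAdd with
    | nil => rfl
    | cons x t =>
      have ht : t = [] := by
        simp only [List.length_cons] at h2
        exact List.eq_nil_of_length_eq_zero (by omega)
      subst ht; rfl
  · rw [if_neg h2, goA_eq addFunc toAdd.length toAdd le_rfl (by omega),
      PySem.List.pyGetD_zero_cons]
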